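-- pv_equiv track=rewrite | github.com/dorythecat/LinkGrapher | parallel.py | prune_links
-- ===== SOURCE A (Python) =====
-- forbidden_content = [ # List of content to skip
--     ".css", ".js", ".php", ".json", ".xml", "mailto:", "googleapis.com",
--     "gstatic.com", "googleusercontent.com", "google.com", "linkedin.com",
--     "facebook.com", "twitter.com", "x.com", "instagram.com", "youtube.com",
--     "youtu.be", ".zip", ".tar", ".gz", ".ico", ".png", ".jpg", ".jpeg",
--     ".gif", ".bmp", ".svg", ".webp"
-- ]
--
-- def is_forbidden(link: str) -> bool:
--     """Check if a link is forbidden based on the content."""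
--     for content in forbidden_content:
--         if content in link:
--             return True
--     return False
--
-- def prune_links(url: str, links: list) -> list:
--     """Prune links to remove duplicates and ensure they are absolute."""
--     seen = set()
--     pruned_links = []
--     domain = url.split("/")[0] + "//" + url.split("/")[2]
--     for link in links:
--         if not link or link.startswith("#"):
--             continue
--         if not link.startswith("http"):
--             if link.startswith("//"):
--                 link = "http:" + link
--             else:
--                 if not link.startswith("/"):
--                     link = "/" + link
--                 link = domain + link
--         if link in seen:
--             continue
--         seen.add(link)
--         if not is_forbidden(link):
--             pruned_links.append(link)
--     return pruned_links
-- ===== SOURCE B (Python) =====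
-- forbidden_content = [ # List of content to skip
--     ".css", ".js", ".php", ".json", ".xml", "mailto:", "googleapis.com",
--     "gstatic.com", "googleusercontent.com", "google.com", "linkedin.com",
--     "facebook.com", "twitter.com", "x.com", "instagram.com", "youtube.com",
--     "youtu.be", ".zip", ".tar", ".gz", ".ico", ".png", ".jpg", ".jpeg",
--     ".gif", ".bmp", ".svg", ".webp"
-- ]
--
-- def is_forbidden(link: str) -> bool:
--     """Check if a link is forbidden based on the content."""
--     return any(content in link for content in forbidden_content)
--
-- def _absolutize(domain: str, link: str) -> str:
--     """Turn one link into an absolute URL (same branch cascade as the spec)."""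
--     if link.startswith("http"):
--         return link
--     if link.startswith("//"):
--         return "http:" + link
--     if link.startswith("/"):
--         return domain + link
--     return domain + "/" + link
--
-- def prune_links(url: str, links: list) -> list:
--     """Prune links: absolutize, dedup by deleting later duplicates, filter."""
--     domain = url.split("/")[0] + "//" + url.split("/")[2]
--     normalized = [_absolutize(domain, l) for l in links if l and not l.startswith("#")]
--     # dedup without any auxiliary set/dict: repeatedly take the head and
--     # delete all of its later duplicates from the remainder
--     deduped = []
--     while normalized:
--         head = normalized[0]
--         deduped.append(head)
--         normalized = [x for x in normalized[1:] if x != head]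
--     return [l for l in deduped if not is_forbidden(l)]
-- ===== Notes on version B (the rewrite author's own statement) =====
-- stated objective: alternative
-- what changed: A's single loop interleaving skip/normalize with a maintained seen-set is replaced by a staged pipeline whose dedup uses no auxiliary structure at all: repeatedly take the head of the normalized list and delete its later duplicates from the remainder, then filter forbidden links afterwards.
import Mathlib
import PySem

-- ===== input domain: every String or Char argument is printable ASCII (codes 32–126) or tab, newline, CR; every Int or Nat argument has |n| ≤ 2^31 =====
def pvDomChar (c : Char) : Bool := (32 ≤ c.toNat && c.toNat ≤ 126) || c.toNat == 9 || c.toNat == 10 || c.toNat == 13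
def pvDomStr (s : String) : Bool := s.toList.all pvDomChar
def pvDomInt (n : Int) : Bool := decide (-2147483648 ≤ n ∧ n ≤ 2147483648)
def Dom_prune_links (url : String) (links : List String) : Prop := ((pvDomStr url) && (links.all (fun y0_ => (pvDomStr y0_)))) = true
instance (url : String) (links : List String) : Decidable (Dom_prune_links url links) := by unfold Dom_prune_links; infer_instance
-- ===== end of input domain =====

-- B replaces A's single loop with a maintained `seen` set by a staged pipeline whose
-- dedup uses no auxiliary structure: take the head, delete its later duplicates, repeat;
-- objective: alternative algorithm for the dedup, same staged cost.

def forbidden_content : List String := [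
    ".css", ".js", ".php", ".json", ".xml", "mailto:", "googleapis.com",
    "gstatic.com", "googleusercontent.com", "google.com", "linkedin.com",
    "facebook.com", "twitter.com", "x.com", "instagram.com", "youtube.com",
    "youtu.be", ".zip", ".tar", ".gz", ".ico", ".png", ".jpg", ".jpeg",
    ".gif", ".bmp", ".svg", ".webp"]

-- ===== PORT A =====
-- A's is_forbidden: a for-loop with early return True
def is_forbidden_loop : List String → String → Bool
  | [], _ => false
  | c :: rest, link => if PySem.Str.isIn c link then true else is_forbidden_loop rest link

def is_forbidden (link : String) : Bool := is_forbidden_loop forbidden_content link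

-- normalization of one link (the branch cascade inside A's loop)
def pv_normalize (domain link : String) : String :=
  if PySem.Str.startswith link "http" then link
  else if PySem.Str.startswith link "//" then PySem.Str.join "" ["http:", link]
  else if PySem.Str.startswith link "/" then PySem.Str.join "" [domain, link]
  else PySem.Str.join "" [domain, PySem.Str.join "" ["/", link]]

-- one iteration of A's loop, state = (seen, pruned_links)
def prune_step (domain : String) (st : PySem.Set String × List String) (link0 : String) :
    PySem.Set String × List String :=
  if link0 == "" || PySem.Str.startswith link0 "#" then st
  else
    let link := pv_normalize domain link0
    if st.1.contains link then st
    else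
      let seen := st.1.add link
      if is_forbidden link then (seen, st.2) else (seen, st.2 ++ [link])

def prune_links (url : String) (links : List String) : List String :=
  -- url.split("/"): sep "/" is nonempty, so split? is always some; [2] raises unless ≥ 3 parts (Pre_)
  let parts := (PySem.Str.split? url "/").getD []
  let domain := PySem.Str.join "" [PySem.List.pyGetD parts 0 "", "//", PySem.List.pyGetD parts 2 ""]
  (links.foldl (prune_step domain) (PySem.Set.empty, [])).2

-- ===== PORT B =====
def is_forbidden_alt (link : String) : Bool :=
  forbidden_content.any (fun c => PySem.Str.isIn c link)

-- B's _absolutize helper: an early-return cascade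
def absolutize (domain link : String) : String :=
  if PySem.Str.startswith link "http" then link
  else if PySem.Str.startswith link "//" then PySem.Str.join "" ["http:", link]
  else if PySem.Str.startswith link "/" then PySem.Str.join "" [domain, link]
  else PySem.Str.join "" [domain, "/", link]

-- B's while-loop dedup: append the head, drop its later duplicates, repeat
def dedupLoop (out : List String) : List String → List String
  | [] => out
  | h :: t => dedupLoop (out ++ [h]) (t.filter (fun x => !(x == h)))
termination_by l => l.length
decreasing_by
  simp only [List.length_unattach]
  exact Nat.lt_succ_of_le (le_trans (List.length_filter_le _ _) (by simp))

def prune_links_alt (url : String) (links : List String) : List String :=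
  let parts := (PySem.Str.split? url "/").getD []
  let domain := PySem.Str.join "" [PySem.List.pyGetD parts 0 "", "//", PySem.List.pyGetD parts 2 ""]
  -- stage 1: comprehension — skip empty/fragment links, absolutize the rest
  let normalized := (links.filter (fun l => !(l == "" || PySem.Str.startswith l "#"))).map
      (absolutize domain)
  -- stage 2: dedup by deleting later duplicates of each head
  let deduped := dedupLoop [] normalized
  -- stage 3: keep non-forbidden links
  deduped.filter (fun l => !is_forbidden_alt l)

-- ===== PRECONDITION & SPEC =====
-- Pre_ excludes only inputs where A raises IndexError: url.split("/") must have at least 3 parts.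
def Pre_prune_links (url : String) (links : List String) : Prop :=
  3 ≤ ((PySem.Str.split? url "/").getD []).length

instance (url : String) (links : List String) : Decidable (Pre_prune_links url links) := by
  unfold Pre_prune_links; infer_instance

def pvWitness_prune_links : String × List String :=
  ("http://example.com", ["page", "", "#top", "/page", "//cdn.net/x", "a.css", "page"])

def Spec_prune_links (url : String) (links : List String) (out : List String) : Prop :=
  out = prune_links_alt url links
instance (url : String) (links : List String) (out : List String) : Decidable (Spec_prune_links url links out) := by
  unfold Spec_prune_links; infer_instance

-- ===== CLAIM (what is proved, stated in full; the proofs are below) =====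
def Claim_equal_prune_links : Prop := ∀ (url : String) (links : List String),
  Dom_prune_links url links → Pre_prune_links url links →
  Spec_prune_links url links (prune_links url links)

-- ===== LEMMAS AND PROOFS =====

-- A's dedup/append step on an already-normalized link (proof-side abbreviation)
def stepCore (st : PySem.Set String × List String) (link : String) :
    PySem.Set String × List String :=
  if st.1.contains link then st
  else if is_forbidden link then (st.1.add link, st.2)
  else (st.1.add link, st.2 ++ [link])

-- the two forbidden tests agree
lemma is_forbidden_eq (link : String) : is_forbidden link = is_forbidden_alt link := by
  unfold is_forbidden is_forbidden_alt
  generalize forbidden_content = cs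
  induction cs with
  | nil => rfl
  | cons c rest ih =>
    by_cases h : PySem.Str.isIn c link <;> simp [is_forbidden_loop, ih]

lemma filter_discard (l : List String) (n : String) (p : String → Bool) (hp : p n = false) :
    (PySem.Set.discard l n).filter p = l.filter p := by
  simp only [PySem.Set.discard, List.filter_filter]
  refine List.filter_congr (fun y _ => ?_)
  by_cases hy : y = n
  · simp [hy, hp]
  · simp [hy]

lemma filter_discard_add (l : List String) (seen : PySem.Set String) (n : String)
    (hmem : n ∉ seen) :
    (PySem.Set.discard l n).filter (fun y => !seen.contains y)
    = l.filter (fun y => !(seen.add n).contains y) := by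
  rw [PySem.Set.add_of_not_mem hmem]
  simp only [PySem.Set.discard, List.filter_filter]
  refine List.filter_congr (fun y _ => ?_)
  by_cases hy : y = n <;> simp [hy, PySem.Set.contains]

-- A's loop over an (already normalized) list = seen-filter then forbidden-filter of the dedup
lemma loop_core (ns : List String) : ∀ (seen : PySem.Set String) (acc : List String),
    (ns.foldl stepCore (seen, acc)).2
    = acc ++ ((PySem.Set.ofList ns).filter (fun y => !seen.contains y)).filter
        (fun l => !is_forbidden l) := by
  induction ns with
  | nil => intro seen acc; simp
  | cons n t ih =>
    intro seen acc
    rw [List.foldl_cons, PySem.Set.ofList_cons]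
    by_cases h : n ∈ seen
    · have hc : seen.contains n = true := by simpa [PySem.Set.contains] using h
      rw [show stepCore (seen, acc) n = (seen, acc) by simp [stepCore, h]]
      rw [ih seen acc, List.filter_cons_of_neg (by simp [h]),
        filter_discard _ _ _ (by simp [h])]
    · have hc : seen.contains n = false := by simpa [PySem.Set.contains] using h
      rw [List.filter_cons_of_pos (by simp [PySem.Set.contains, h]), filter_discard_add _ _ _ h]
      by_cases hf : is_forbidden n
      · rw [show stepCore (seen, acc) n = (seen.add n, acc) by simp [stepCore, h, hf]]
        rw [ih (seen.add n) acc, List.filter_cons_of_neg (by simp [hf])]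
      · rw [show stepCore (seen, acc) n = (seen.add n, acc ++ [n]) by
          simp [stepCore, h, hf]]
        rw [ih (seen.add n) (acc ++ [n]), List.filter_cons_of_pos (by simp [hf]),
          List.append_assoc, List.singleton_append]

-- lift loop_core through the skip/normalize step of A's outer loop
lemma loop_lift (domain : String) (links : List String) :
    ∀ (st : PySem.Set String × List String),
    links.foldl (prune_step domain) st
    = (links.filterMap (fun l => if l == "" || PySem.Str.startswith l "#" then none
          else some (pv_normalize domain l))).foldl stepCore st := by
  induction links with
  | nil => intro st; rfl
  | cons l t ih =>
    intro st
    by_cases hs : (l == "" || PySem.Str.startswith l "#") = true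
    · have hp : prune_step domain st l = st := by unfold prune_step; rw [if_pos hs]
      simp only [List.foldl_cons, List.filterMap_cons, hs, reduceIte, hp]
      exact ih st
    · have hs' : (l == "" || PySem.Str.startswith l "#") = false := by
        simpa using hs
      have hp : prune_step domain st l = stepCore st (pv_normalize domain l) := by
        unfold prune_step stepCore; rw [if_neg hs]
      simp only [List.foldl_cons, List.filterMap_cons, hs', Bool.false_eq_true, reduceIte, hp]
      exact ih _

-- B's absolutize is A's inline cascade
lemma absolutize_eq (domain link : String) :
    absolutize domain link = pv_normalize domain link := by
  unfold absolutize pv_normalize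
  split_ifs <;> simp [PySem.Str.join, PySem.Chars.join, List.intercalate, List.intersperse]

-- B's stage 1 (filter + map) is the filterMap of loop_lift
lemma stage1_eq (domain : String) (links : List String) :
    (links.filter (fun l => !(l == "" || PySem.Str.startswith l "#"))).map (absolutize domain)
    = links.filterMap (fun l => if l == "" || PySem.Str.startswith l "#" then none
        else some (pv_normalize domain l)) := by
  induction links with
  | nil => rfl
  | cons l t ih =>
    by_cases hs : (l == "" || PySem.Str.startswith l "#") = true
    · rw [List.filter_cons_of_neg (by rw [hs]; simp), List.filterMap_cons]
      simp only [hs, reduceIte]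
      exact ih
    · have hs' : (l == "" || PySem.Str.startswith l "#") = false := by simpa using hs
      rw [List.filter_cons_of_pos (by rw [hs']; simp), List.map_cons, List.filterMap_cons]
      simp only [hs', Bool.false_eq_true, reduceIte]
      rw [ih, absolutize_eq]

-- the two filters (discard and p) commute
lemma discard_filter_swap (p : String → Bool) (s : List String) (x : String) :
    PySem.Set.discard (s.filter p) x = (PySem.Set.discard s x).filter p := by
  simp only [PySem.Set.discard, List.filter_filter]
  exact List.filter_congr (fun y _ => Bool.and_comm _ _)

-- ofList commutes with filter
lemma ofList_filter (p : String → Bool) (xs : List String) :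
    PySem.Set.ofList (xs.filter p) = (PySem.Set.ofList xs).filter p := by
  induction xs with
  | nil => rfl
  | cons x t ih =>
    by_cases hx : p x = true
    · rw [List.filter_cons_of_pos hx, PySem.Set.ofList_cons, PySem.Set.ofList_cons, ih,
        List.filter_cons_of_pos hx, discard_filter_swap]
    · have hx' : p x = false := by simpa using hx
      rw [List.filter_cons_of_neg (by simp [hx']), PySem.Set.ofList_cons, ih,
        List.filter_cons_of_neg (by simp [hx']), filter_discard _ _ _ hx']

-- B's head-and-delete dedup loop computes set(xs) in first-occurrence order
lemma dedupLoop_eq : ∀ (n : Nat) (ls : List String), ls.length ≤ n →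
    ∀ out, dedupLoop out ls = out ++ PySem.Set.ofList ls := by
  intro n
  induction n with
  | zero =>
    intro ls h out
    cases ls with
    | nil => rw [dedupLoop.eq_def]; simp
    | cons x t => simp at h
  | succ n ih =>
    intro ls h out
    cases ls with
    | nil => rw [dedupLoop.eq_def]; simp
    | cons x t =>
      rw [dedupLoop.eq_def]
      dsimp only
      rw [ih _ (le_trans (List.length_filter_le _ _) (Nat.le_of_succ_le_succ h)),
        PySem.Set.ofList_cons, ofList_filter]
      simp [PySem.Set.discard, List.append_assoc]

-- ===== VERDICT (by name: the statement is the Claim_ definition above) =====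
theorem prune_links_spec : Claim_equal_prune_links := by
  intro url links _ _
  unfold Spec_prune_links prune_links prune_links_alt
  dsimp only
  rw [loop_lift, loop_core, stage1_eq, dedupLoop_eq _ _ (Nat.le_refl _)]
  simp [is_forbidden_eq]
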